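-- pv_equiv track=rewrite | github.com/hyeonjeong-ko/algorithm-challenges | programmers/Python/P340211_충돌위험_찾기.py | solution
-- ===== SOURCE A (Python) =====
-- from collections import Counter
--
-- def solution(points, routes):
--     def bfs(route):
--         idx = 0
--         pa = []
--         for i in range(len(route) - 1):
--             sx, sy = points[route[i] - 1]
--             ex, ey = points[route[i + 1] - 1]
--
--             # x 좌표 맞추기
--             while sx != ex:
--                 pa.append((sx, sy, idx))
--                 if sx < ex:
--                     sx += 1
--                 else:
--                     sx -= 1
--                 idx += 1
--
--             # y 좌표 맞추기
--             while sy != ey: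
--                 pa.append((sx, sy, idx))
--                 if sy < ey:
--                     sy += 1
--                 else:
--                     sy -= 1
--                 idx += 1
--         pa.append((sx, sy, idx))
--         return pa
--
--     second = []
--
--     for route in routes:
--         second.extend(bfs(route))
--     res = 0
--     temp = Counter(second)
--     for i in temp.values():
--         if i >= 2:
--             res += 1
--
--     return res
-- ===== SOURCE B (Python) =====
-- def solution(points, routes):
--     # Build every (x, y, t) cell in closed form per segment (no unit stepping),
--     # then sort all cells and count duplicate runs in one scan.
--     cells = []
--     for route in routes:
--         t = 0
--         for a, b in zip(route, route[1:]):
--             sx, sy = points[a - 1]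
--             ex, ey = points[b - 1]
--             dx = 1 if sx < ex else -1
--             dy = 1 if sy < ey else -1
--             cells += [(sx + dx * i, sy, t + i) for i in range(abs(ex - sx))]
--             t += abs(ex - sx)
--             cells += [(ex, sy + dy * j, t + j) for j in range(abs(ey - sy))]
--             t += abs(ey - sy)
--         fx, fy = points[route[-1] - 1]
--         cells.append((fx, fy, t))
--     cells.sort()
--     res = 0
--     prev = None
--     run = 0
--     for c in cells:
--         if c == prev:
--             run += 1
--         else:
--             if run >= 2:
--                 res += 1
--             prev = c
--             run = 1
--     if run >= 2:
--         res += 1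
--     return res
-- ===== Notes on version B (the rewrite author's own statement) =====
-- stated objective: alternative
-- what changed: B computes each path cell's coordinates in closed form per segment (index arithmetic over range, no unit-stepping mutation), then sorts the whole cell list and counts duplicate runs in a single prev/run scan, replacing A's step-by-step simulation plus Counter aggregation and values() pass.
import Mathlib
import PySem

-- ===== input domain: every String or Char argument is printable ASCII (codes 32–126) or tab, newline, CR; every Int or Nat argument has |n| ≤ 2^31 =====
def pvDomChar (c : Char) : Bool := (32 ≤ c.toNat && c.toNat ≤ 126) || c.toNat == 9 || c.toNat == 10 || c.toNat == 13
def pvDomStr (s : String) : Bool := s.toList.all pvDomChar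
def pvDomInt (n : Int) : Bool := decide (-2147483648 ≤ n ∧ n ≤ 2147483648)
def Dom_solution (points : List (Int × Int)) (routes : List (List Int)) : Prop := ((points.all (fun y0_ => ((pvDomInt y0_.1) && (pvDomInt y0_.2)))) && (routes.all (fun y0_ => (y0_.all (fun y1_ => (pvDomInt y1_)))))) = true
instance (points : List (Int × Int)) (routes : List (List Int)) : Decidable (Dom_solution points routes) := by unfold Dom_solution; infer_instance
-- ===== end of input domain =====

-- B builds every (x, y, t) cell in closed form per segment (index arithmetic instead of
-- unit stepping), then sorts the cells and counts duplicate runs in one scan (objective: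
-- alternative — sort-and-scan replaces the Counter aggregation).

-- ===== PORT A =====
-- the 'while sx != ex' loop of bfs: returns (appended cells, final sx, final idx);
-- the Nat fuel |ex - sx| is exactly the loop's trip count (a totality guard only)
def pvWalkXGo (sy ex : Int) : Nat → Int → Int → List (Int × Int × Int) × Int × Int
  | 0, sx, t => ([], sx, t)
  | n + 1, sx, t =>
      if sx = ex then ([], sx, t)
      else if sx < ex then
        let r := pvWalkXGo sy ex n (sx + 1) (t + 1)
        ((sx, sy, t) :: r.1, r.2)
      else
        let r := pvWalkXGo sy ex n (sx - 1) (t + 1)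
        ((sx, sy, t) :: r.1, r.2)

def pvWalkX (sy ex : Int) (sx t : Int) : List (Int × Int × Int) × Int × Int :=
  pvWalkXGo sy ex (ex - sx).natAbs sx t

-- the 'while sy != ey' loop: returns (appended cells, final sy, final idx)
def pvWalkYGo (fx ey : Int) : Nat → Int → Int → List (Int × Int × Int) × Int × Int
  | 0, sy, t => ([], sy, t)
  | n + 1, sy, t =>
      if sy = ey then ([], sy, t)
      else if sy < ey then
        let r := pvWalkYGo fx ey n (sy + 1) (t + 1)
        ((fx, sy, t) :: r.1, r.2)
      else
        let r := pvWalkYGo fx ey n (sy - 1) (t + 1)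
        ((fx, sy, t) :: r.1, r.2)

def pvWalkY (fx ey : Int) (sy t : Int) : List (Int × Int × Int) × Int × Int :=
  pvWalkYGo fx ey (ey - sy).natAbs sy t

-- the 'for i in range(len(route)-1)' loop over adjacent route ids; sx, sy, t are the
-- Python locals carried across iterations; returns (pa, final sx, final sy, final idx)
def pvBfsGo (points : List (Int × Int)) : List Int → Int → Int → Int → List (Int × Int × Int) × Int × Int × Int
  | [], sx, sy, t => ([], sx, sy, t)
  | [_], sx, sy, t => ([], sx, sy, t)
  | cur :: nxt :: rest, _, _, t =>
      let s := PySem.List.pyGetD points (cur - 1) (0, 0)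
      let e := PySem.List.pyGetD points (nxt - 1) (0, 0)
      let wx := pvWalkX s.2 e.1 s.1 t
      let wy := pvWalkY wx.2.1 e.2 s.2 wx.2.2
      let rc := pvBfsGo points (nxt :: rest) wx.2.1 wy.2.1 wy.2.2
      (wx.1 ++ wy.1 ++ rc.1, rc.2)

-- bfs(route); for routes of length < 2 Python leaves sx undefined (NameError, outside Pre_):
-- the port seeds sx, sy with the first point's coordinates there
def pvBfs (points : List (Int × Int)) (route : List Int) : List (Int × Int × Int) :=
  match route with
  | [] => []
  | r :: _ =>
      let p0 := PySem.List.pyGetD points (r - 1) (0, 0)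
      let rc := pvBfsGo points route p0.1 p0.2 0
      rc.1 ++ [(rc.2.1, rc.2.2.1, rc.2.2.2)]

def solution (points : List (Int × Int)) (routes : List (List Int)) : Int :=
  let second := routes.foldl (fun acc route => acc ++ pvBfs points route) []
  let temp := PySem.Dict.counter second
  temp.values.foldl (fun res i => if 2 ≤ i then res + 1 else res) 0

-- ===== PORT B =====
-- Python's tuple comparison on (x, y, t): lexicographic '<', written out on the components
def pvLess (a b : Int × Int × Int) : Bool :=
  decide (a.1 < b.1) || (decide (a.1 = b.1) &&
    (decide (a.2.1 < b.2.1) || (decide (a.2.1 = b.2.1) && decide (a.2.2 < b.2.2))))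

-- 'cells.sort()': Python's stable sort, as PySem's insertion-sort fold (rfl-equal to
-- PySem.List.sorted with a lexicographic key, see pvSort_eq below)
def pvSort (cs : List (Int × Int × Int)) : List (Int × Int × Int) :=
  cs.foldl (fun acc x => PySem.List.insertBy pvLess x acc) []

-- '[(sx + dx * i, sy, t + i) for i in range(abs(ex - sx))]'
def pvSegX (sx sy ex t : Int) : List (Int × Int × Int) :=
  (PySem.List.pyRange 0 ((ex - sx).natAbs : Int) 1).map
    (fun i => (sx + (if sx < ex then 1 else -1) * i, sy, t + i))

-- '[(ex, sy + dy * j, t + j) for j in range(abs(ey - sy))]'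
def pvSegY (ex sy ey t : Int) : List (Int × Int × Int) :=
  (PySem.List.pyRange 0 ((ey - sy).natAbs : Int) 1).map
    (fun j => (ex, sy + (if sy < ey then 1 else -1) * j, t + j))

-- one iteration of 'for a, b in zip(route, route[1:])': st = (cells, t); the segment's
-- endpoints are read from points exactly as 'sx, sy = points[a-1]; ex, ey = points[b-1]'
def pvSegStep (points : List (Int × Int)) (st : List (Int × Int × Int) × Int) (ab : Int × Int) :
    List (Int × Int × Int) × Int :=
  (st.1
      ++ pvSegX (PySem.List.pyGetD points (ab.1 - 1) (0, 0)).1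
          (PySem.List.pyGetD points (ab.1 - 1) (0, 0)).2
          (PySem.List.pyGetD points (ab.2 - 1) (0, 0)).1 st.2
      ++ pvSegY (PySem.List.pyGetD points (ab.2 - 1) (0, 0)).1
          (PySem.List.pyGetD points (ab.1 - 1) (0, 0)).2
          (PySem.List.pyGetD points (ab.2 - 1) (0, 0)).2
          (st.2 + (((PySem.List.pyGetD points (ab.2 - 1) (0, 0)).1
                      - (PySem.List.pyGetD points (ab.1 - 1) (0, 0)).1).natAbs : Int)),
    st.2 + (((PySem.List.pyGetD points (ab.2 - 1) (0, 0)).1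
               - (PySem.List.pyGetD points (ab.1 - 1) (0, 0)).1).natAbs : Int)
         + (((PySem.List.pyGetD points (ab.2 - 1) (0, 0)).2
               - (PySem.List.pyGetD points (ab.1 - 1) (0, 0)).2).natAbs : Int))

-- one iteration of the outer 'for route in routes' loop: the segment fold, then
-- 'fx, fy = points[route[-1] - 1]; cells.append((fx, fy, t))'
def pvRouteStep (points : List (Int × Int)) (cells : List (Int × Int × Int))
    (route : List Int) : List (Int × Int × Int) :=
  ((route.zip (route.drop 1)).foldl (pvSegStep points) (cells, 0)).1
    ++ [((PySem.List.pyGetD points ((PySem.List.pyGetD route (-1) 0) - 1) (0, 0)).1,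
         (PySem.List.pyGetD points ((PySem.List.pyGetD route (-1) 0) - 1) (0, 0)).2,
         ((route.zip (route.drop 1)).foldl (pvSegStep points) (cells, 0)).2)]

-- one iteration of the run-counting scan: st = (res, prev, run)
def pvScanStep (st : Int × Option (Int × Int × Int) × Int) (c : Int × Int × Int) :
    Int × Option (Int × Int × Int) × Int :=
  if some c = st.2.1 then (st.1, st.2.1, st.2.2 + 1)
  else ((if 2 ≤ st.2.2 then st.1 + 1 else st.1), some c, 1)

-- the trailing 'if run >= 2: res += 1'
def pvFinish (st : Int × Option (Int × Int × Int) × Int) : Int :=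
  if 2 ≤ st.2.2 then st.1 + 1 else st.1

def solution_alt (points : List (Int × Int)) (routes : List (List Int)) : Int :=
  pvFinish ((pvSort (routes.foldl (pvRouteStep points) [])).foldl pvScanStep (0, none, 0))

-- ===== PRECONDITION & SPEC =====
-- Pre_ excludes exactly the inputs on which Python A raises: a route with fewer than two
-- stops (NameError: sx undefined) or a route id whose index r-1 is out of range (IndexError).
def Pre_solution (points : List (Int × Int)) (routes : List (List Int)) : Prop :=
  ∀ route ∈ routes, 2 ≤ route.length ∧ ∀ r ∈ route, PySem.Raise.InRange points.length (r - 1)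
instance (points : List (Int × Int)) (routes : List (List Int)) : Decidable (Pre_solution points routes) := by
  unfold Pre_solution; infer_instance

def pvWitness_solution : (List (Int × Int)) × List (List Int) := ([(0, 0), (2, 1)], [[1, 2], [2, 1]])

def Spec_solution (points : List (Int × Int)) (routes : List (List Int)) (out : Int) : Prop := out = solution_alt points routes
instance (points : List (Int × Int)) (routes : List (List Int)) (out : Int) : Decidable (Spec_solution points routes out) := by unfold Spec_solution; infer_instance

-- ===== CLAIM (what is proved, stated in full; the proofs are below) =====
def Claim_equal_solution : Prop := ∀ (points : List (Int × Int)) (routes : List (List Int)), Dom_solution points routes → Pre_solution points routes → Spec_solution points routes (solution points routes)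

-- ===== LEMMAS AND PROOFS =====

-- the sort key naming Python's tuple order: an injective map into the lexicographic product
def pvKey3 (c : Int × Int × Int) : Lex (Int × Lex (Int × Int)) := toLex (c.1, toLex (c.2.1, c.2.2))

theorem pvLess_eq (a b : Int × Int × Int) : pvLess a b = decide (pvKey3 a < pvKey3 b) := by
  have h : (pvKey3 a < pvKey3 b)
      ↔ (a.1 < b.1 ∨ (a.1 = b.1 ∧ (a.2.1 < b.2.1 ∨ (a.2.1 = b.2.1 ∧ a.2.2 < b.2.2)))) := by
    simp [pvKey3, Prod.Lex.toLex_lt_toLex]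
  rw [show decide (pvKey3 a < pvKey3 b)
      = decide (a.1 < b.1 ∨ (a.1 = b.1 ∧ (a.2.1 < b.2.1 ∨ (a.2.1 = b.2.1 ∧ a.2.2 < b.2.2))))
    from decide_eq_decide.mpr h]
  simp [pvLess, Bool.decide_or, Bool.decide_and]

theorem pvSort_eq (cs : List (Int × Int × Int)) :
    pvSort cs = PySem.List.sorted cs pvKey3 false := by
  unfold pvSort
  rw [show pvLess = (fun a b => decide (pvKey3 a < pvKey3 b))
    from funext fun a => funext fun b => pvLess_eq a b]
  rw [← PySem.List.sorted_eq_foldl_insertBy]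

theorem pvKey3_inj : Function.Injective pvKey3 := by
  intro a b h
  unfold pvKey3 at h
  have h1 := toLex.injective h
  have h2 := toLex.injective (congrArg Prod.snd h1)
  exact Prod.ext (congrArg Prod.fst h1) (Prod.ext (congrArg Prod.fst h2) (congrArg Prod.snd h2))

-- full closed form of the x-walk, increasing leg
theorem pvWalkX_up (sy ex : Int) : ∀ (n : Nat) (sx t : Int), sx + n = ex →
    pvWalkXGo sy ex n sx t
      = ((List.range n).map (fun k : Nat => (sx + (k : Int), sy, t + (k : Int))), ex, t + n) := by
  intro n
  induction n with
  | zero =>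
    intro sx t h
    simp [pvWalkXGo]
    omega
  | succ n ih =>
    intro sx t h
    have hlt : sx < ex := by omega
    rw [show pvWalkXGo sy ex (n + 1) sx t
        = ((sx, sy, t) :: (pvWalkXGo sy ex n (sx + 1) (t + 1)).1, (pvWalkXGo sy ex n (sx + 1) (t + 1)).2)
      from by rw [pvWalkXGo, if_neg (by omega : ¬ sx = ex), if_pos hlt]]
    rw [ih (sx + 1) (t + 1) (by push_cast at h ⊢; omega)]
    dsimp only
    refine congrArg₂ _ ?_ (by push_cast; refine congrArg₂ _ rfl (by ring))
    rw [List.range_succ_eq_map, List.map_cons, List.map_map]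
    refine congrArg₂ _ (by simp) ?_
    apply List.map_congr_left
    intro k _
    simp only [Function.comp_apply, Prod.ext_iff, true_and]
    push_cast
    omega

-- full closed form of the x-walk, decreasing leg
theorem pvWalkX_down (sy ex : Int) : ∀ (n : Nat) (sx t : Int), sx - n = ex →
    pvWalkXGo sy ex n sx t
      = ((List.range n).map (fun k : Nat => (sx - (k : Int), sy, t + (k : Int))), ex, t + n) := by
  intro n
  induction n with
  | zero =>
    intro sx t h
    simp [pvWalkXGo]
    omega
  | succ n ih =>
    intro sx t h
    have hlt : ex < sx := by push_cast at h; omega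
    rw [show pvWalkXGo sy ex (n + 1) sx t
        = ((sx, sy, t) :: (pvWalkXGo sy ex n (sx - 1) (t + 1)).1, (pvWalkXGo sy ex n (sx - 1) (t + 1)).2)
      from by rw [pvWalkXGo, if_neg (by omega : ¬ sx = ex), if_neg (by omega : ¬ sx < ex)]]
    rw [ih (sx - 1) (t + 1) (by push_cast at h ⊢; omega)]
    dsimp only
    refine congrArg₂ _ ?_ (by push_cast; refine congrArg₂ _ rfl (by ring))
    rw [List.range_succ_eq_map, List.map_cons, List.map_map]
    refine congrArg₂ _ (by simp) ?_
    apply List.map_congr_left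
    intro k _
    simp only [Function.comp_apply, Prod.ext_iff, true_and]
    push_cast
    omega

theorem pvWalkY_up (fx ey : Int) : ∀ (n : Nat) (sy t : Int), sy + n = ey →
    pvWalkYGo fx ey n sy t
      = ((List.range n).map (fun k : Nat => (fx, sy + (k : Int), t + (k : Int))), ey, t + n) := by
  intro n
  induction n with
  | zero =>
    intro sy t h
    simp [pvWalkYGo]
    omega
  | succ n ih =>
    intro sy t h
    have hlt : sy < ey := by omega
    rw [show pvWalkYGo fx ey (n + 1) sy t
        = ((fx, sy, t) :: (pvWalkYGo fx ey n (sy + 1) (t + 1)).1, (pvWalkYGo fx ey n (sy + 1) (t + 1)).2)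
      from by rw [pvWalkYGo, if_neg (by omega : ¬ sy = ey), if_pos hlt]]
    rw [ih (sy + 1) (t + 1) (by push_cast at h ⊢; omega)]
    dsimp only
    refine congrArg₂ _ ?_ (by push_cast; refine congrArg₂ _ rfl (by ring))
    rw [List.range_succ_eq_map, List.map_cons, List.map_map]
    refine congrArg₂ _ (by simp) ?_
    apply List.map_congr_left
    intro k _
    simp only [Function.comp_apply, Prod.ext_iff, true_and]
    push_cast
    omega

theorem pvWalkY_down (fx ey : Int) : ∀ (n : Nat) (sy t : Int), sy - n = ey →
    pvWalkYGo fx ey n sy t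
      = ((List.range n).map (fun k : Nat => (fx, sy - (k : Int), t + (k : Int))), ey, t + n) := by
  intro n
  induction n with
  | zero =>
    intro sy t h
    simp [pvWalkYGo]
    omega
  | succ n ih =>
    intro sy t h
    have hlt : ey < sy := by push_cast at h; omega
    rw [show pvWalkYGo fx ey (n + 1) sy t
        = ((fx, sy, t) :: (pvWalkYGo fx ey n (sy - 1) (t + 1)).1, (pvWalkYGo fx ey n (sy - 1) (t + 1)).2)
      from by rw [pvWalkYGo, if_neg (by omega : ¬ sy = ey), if_neg (by omega : ¬ sy < ey)]]
    rw [ih (sy - 1) (t + 1) (by push_cast at h ⊢; omega)]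
    dsimp only
    refine congrArg₂ _ ?_ (by push_cast; refine congrArg₂ _ rfl (by ring))
    rw [List.range_succ_eq_map, List.map_cons, List.map_map]
    refine congrArg₂ _ (by simp) ?_
    apply List.map_congr_left
    intro k _
    simp only [Function.comp_apply, Prod.ext_iff, true_and]
    push_cast
    omega

-- A's x-walk ends exactly at ex, having advanced idx by the leg's length
theorem pvWalkX_final (sy ex sx t : Int) : (pvWalkX sy ex sx t).2.1 = ex := by
  unfold pvWalkX
  rcases le_total sx ex with h | h
  · rw [pvWalkX_up sy ex (ex - sx).natAbs sx t (by omega)]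
  · rw [pvWalkX_down sy ex (ex - sx).natAbs sx t (by omega)]

theorem pvWalkY_final (fx ey sy t : Int) : (pvWalkY fx ey sy t).2.1 = ey := by
  unfold pvWalkY
  rcases le_total sy ey with h | h
  · rw [pvWalkY_up fx ey (ey - sy).natAbs sy t (by omega)]
  · rw [pvWalkY_down fx ey (ey - sy).natAbs sy t (by omega)]

theorem pvWalkX_idx (sy ex sx t : Int) :
    (pvWalkX sy ex sx t).2.2 = t + ((ex - sx).natAbs : Int) := by
  unfold pvWalkX
  rcases le_total sx ex with h | h
  · rw [pvWalkX_up sy ex (ex - sx).natAbs sx t (by omega)]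
  · rw [pvWalkX_down sy ex (ex - sx).natAbs sx t (by omega)]

theorem pvWalkY_idx (fx ey sy t : Int) :
    (pvWalkY fx ey sy t).2.2 = t + ((ey - sy).natAbs : Int) := by
  unfold pvWalkY
  rcases le_total sy ey with h | h
  · rw [pvWalkY_up fx ey (ey - sy).natAbs sy t (by omega)]
  · rw [pvWalkY_down fx ey (ey - sy).natAbs sy t (by omega)]

-- B's closed-form x-segment is exactly the x-walk's cell list
theorem pvSegX_eq (sx sy ex t : Int) : pvSegX sx sy ex t = (pvWalkX sy ex sx t).1 := by
  unfold pvSegX pvWalkX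
  rw [PySem.List.pyRange_zero_natCast, List.map_map]
  by_cases h : sx < ex
  · rw [pvWalkX_up sy ex ((ex - sx).natAbs) sx t (by omega)]
    apply List.map_congr_left
    intro k _
    simp [Function.comp, h]
  · rw [pvWalkX_down sy ex ((ex - sx).natAbs) sx t (by omega)]
    apply List.map_congr_left
    intro k _
    simp only [Function.comp_apply, if_neg h, Prod.ext_iff, and_true]
    omega

theorem pvSegY_eq (ex sy ey t : Int) : pvSegY ex sy ey t = (pvWalkY ex ey sy t).1 := by
  unfold pvSegY pvWalkY
  rw [PySem.List.pyRange_zero_natCast, List.map_map]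
  by_cases h : sy < ey
  · rw [pvWalkY_up ex ey ((ey - sy).natAbs) sy t (by omega)]
    apply List.map_congr_left
    intro k _
    simp [Function.comp, h]
  · rw [pvWalkY_down ex ey ((ey - sy).natAbs) sy t (by omega)]
    apply List.map_congr_left
    intro k _
    simp only [Function.comp_apply, if_neg h, Prod.ext_iff, true_and, and_true]
    omega

-- B's fold over zip(route, route[1:]) is A's segment loop (pvBfsGo ignores the carried
-- position except in the base case, where it does not reach the returned cells or idx)
theorem pvZipFold (points : List (Int × Int)) : ∀ (rest : List Int) (r : Int)
    (cells : List (Int × Int × Int)) (t sx sy : Int),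
    ((r :: rest).zip rest).foldl (pvSegStep points) (cells, t)
      = (cells ++ (pvBfsGo points (r :: rest) sx sy t).1,
         (pvBfsGo points (r :: rest) sx sy t).2.2.2) := by
  intro rest
  induction rest with
  | nil =>
    intro r cells t sx sy
    simp [pvBfsGo]
  | cons b rest ih =>
    intro r cells t sx sy
    rw [List.zip_cons_cons, List.foldl_cons]
    set s1 := (PySem.List.pyGetD points (r - 1) (0, 0)).1 with hs1
    set s2 := (PySem.List.pyGetD points (r - 1) (0, 0)).2 with hs2
    set e1 := (PySem.List.pyGetD points (b - 1) (0, 0)).1 with he1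
    set e2 := (PySem.List.pyGetD points (b - 1) (0, 0)).2 with he2
    rw [show pvSegStep points (cells, t) (r, b)
        = (cells ++ pvSegX s1 s2 e1 t
            ++ pvSegY e1 s2 e2 (t + ((e1 - s1).natAbs : Int)),
          t + ((e1 - s1).natAbs : Int) + ((e2 - s2).natAbs : Int)) from rfl]
    simp only [pvBfsGo]
    rw [← hs1, ← hs2, ← he1, ← he2]
    rw [pvSegX_eq, pvSegY_eq, pvWalkX_final, pvWalkX_idx, pvWalkY_idx]
    rw [ih b _ _ e1 ((pvWalkY e1 e2 s2 (t + ((e1 - s1).natAbs : Int))).2.1)]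
    simp [List.append_assoc]

-- after a segment loop seeded with the first point's coordinates, the carried position
-- is the last route point's coordinates
theorem pvBfsGo_pos (points : List (Int × Int)) : ∀ (rest : List Int) (r sx sy t : Int),
    sx = (PySem.List.pyGetD points (r - 1) (0, 0)).1 →
    sy = (PySem.List.pyGetD points (r - 1) (0, 0)).2 →
    (pvBfsGo points (r :: rest) sx sy t).2.1
        = (PySem.List.pyGetD points ((PySem.List.pyGetD (r :: rest) (-1) 0) - 1) (0, 0)).1
      ∧ (pvBfsGo points (r :: rest) sx sy t).2.2.1
        = (PySem.List.pyGetD points ((PySem.List.pyGetD (r :: rest) (-1) 0) - 1) (0, 0)).2 := by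
  intro rest
  induction rest with
  | nil =>
    intro r sx sy t hx hy
    rw [PySem.List.pyGetD_neg_one _ _ (by simp)]
    simp [pvBfsGo, hx, hy]
  | cons b rest ih =>
    intro r sx sy t hx hy
    have hlast : PySem.List.pyGetD (r :: b :: rest) (-1) 0 = PySem.List.pyGetD (b :: rest) (-1) 0 := by
      rw [PySem.List.pyGetD_neg_one _ _ (by simp), PySem.List.pyGetD_neg_one _ _ (by simp)]
      exact List.getLast_cons _
    rw [hlast]
    simp only [pvBfsGo]
    exact ih b _ _ _ (by rw [pvWalkX_final]) (by rw [pvWalkY_final])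

-- one iteration of B's route loop appends exactly A's bfs(route) cells
theorem pvRouteB_eq (points : List (Int × Int)) (route : List Int) (h : route ≠ [])
    (cells : List (Int × Int × Int)) :
    pvRouteStep points cells route = cells ++ pvBfs points route := by
  match route with
  | [] => exact absurd rfl h
  | r :: rest =>
    unfold pvRouteStep
    rw [show (r :: rest).drop 1 = rest from rfl]
    rw [pvZipFold points rest r cells 0 (PySem.List.pyGetD points (r - 1) (0, 0)).1
        (PySem.List.pyGetD points (r - 1) (0, 0)).2]
    obtain ⟨h1, h2⟩ := pvBfsGo_pos points rest r _ _ 0 rfl rfl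
    simp only [pvBfs, ← h1, ← h2, List.append_assoc]

-- Nodup lists with the same members have the same countP (perm_ext + Perm.countP_eq)
theorem pvCountP_eq {α : Type} (p : α → Bool) (u v : List α) (hu : u.Nodup) (hv : v.Nodup)
    (h : ∀ x, x ∈ u ↔ x ∈ v) : u.countP p = v.countP p :=
  ((List.perm_ext_iff_of_nodup hu hv).mpr h).countP_eq p

-- number of distinct cells occurring at least twice
def pvDupCount (t : List (Int × Int × Int)) : Int :=
  ((PySem.Set.ofList t).countP (fun k => decide ((2 : Int) ≤ (t.count k : Int))) : Nat)

theorem pvDupCount_cons (c : Int × Int × Int) (cs : List (Int × Int × Int)) :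
    pvDupCount (c :: cs) = (if (1 : Int) ≤ (cs.count c : Int) then 1 else 0)
      + pvDupCount (cs.filter (fun x => decide (x ≠ c))) := by
  unfold pvDupCount
  rw [pvCountP_eq _ (PySem.Set.ofList (c :: cs))
      (c :: PySem.Set.ofList (cs.filter (fun x => decide (x ≠ c))))
      (PySem.Set.nodup_ofList _)
      (List.nodup_cons.mpr ⟨fun hc => by
          have := (PySem.Set.mem_ofList _ _).mp hc
          simp at this, PySem.Set.nodup_ofList _⟩)
      (fun x => by
        rw [PySem.Set.mem_ofList, List.mem_cons, List.mem_cons, PySem.Set.mem_ofList,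
            List.mem_filter]
        by_cases hxc : x = c <;> simp [hxc])]
  rw [List.countP_cons]
  have htail : List.countP (fun k => decide ((2 : Int) ≤ ((c :: cs).count k : Int)))
        (PySem.Set.ofList (cs.filter (fun x => decide (x ≠ c))))
      = List.countP (fun k => decide ((2 : Int) ≤ ((cs.filter (fun x => decide (x ≠ c))).count k : Int)))
        (PySem.Set.ofList (cs.filter (fun x => decide (x ≠ c)))) := by
    apply List.countP_congr
    intro x hx
    have hxf := (PySem.Set.mem_ofList _ _).mp hx
    have hxc : x ≠ c := by
      have := (List.mem_filter.mp hxf).2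
      simpa using this
    have h1 : (c :: cs).count x = (cs.filter (fun y => decide (y ≠ c))).count x := by
      rw [List.count_cons_of_ne hxc.symm, List.count_filter (by simpa using hxc)]
    simp [h1]
  rw [htail]
  simp only [List.count_cons_self]
  generalize List.countP _ (PySem.Set.ofList (cs.filter (fun x => decide (x ≠ c)))) = d
  generalize cs.count c = m
  by_cases hm : (1 : Int) ≤ (m : Int)
  · rw [if_pos hm, if_pos (by simp; omega)]
    push_cast
    ring
  · rw [if_neg hm, if_neg (by simp; omega)]
    push_cast
    ring

theorem pvDupCount_perm {l l' : List (Int × Int × Int)} (h : l.Perm l') :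
    pvDupCount l = pvDupCount l' := by
  unfold pvDupCount
  have hp : (fun k : Int × Int × Int => decide ((2 : Int) ≤ (l.count k : Int)))
      = (fun k => decide ((2 : Int) ≤ (l'.count k : Int))) :=
    funext fun k => by rw [h.count_eq]
  rw [hp]
  exact congrArg _ (pvCountP_eq _ _ _ (PySem.Set.nodup_ofList _) (PySem.Set.nodup_ofList _)
    (fun x => by rw [PySem.Set.mem_ofList, PySem.Set.mem_ofList, h.mem_iff]))

-- B's scan through a sorted tail: given a current run of r ≥ 1 copies of p, the least
-- element seen so far, it counts p's run (if it reaches length 2) and every later duplicate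
theorem pvScan_go : ∀ (s : List (Int × Int × Int)),
    s.Pairwise (fun a b => pvKey3 a ≤ pvKey3 b) →
    ∀ (p : Int × Int × Int) (r res : Int), (∀ c ∈ s, pvKey3 p ≤ pvKey3 c) → 1 ≤ r →
    pvFinish (s.foldl pvScanStep (res, some p, r))
      = res + (if (2 : Int) ≤ r + (s.count p : Int) then 1 else 0)
          + pvDupCount (s.filter (fun x => decide (x ≠ p))) := by
  intro s
  induction s with
  | nil =>
    intro _ p r res _ _
    simp only [List.foldl_nil, List.count_nil, List.filter_nil, pvFinish, pvDupCount]
    norm_num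
    split_ifs <;> omega
  | cons c cs ih =>
    intro hp p r res hle hr
    rw [List.pairwise_cons] at hp
    obtain ⟨hc, hcs⟩ := hp
    rw [List.foldl_cons]
    by_cases hcp : c = p
    · subst hcp
      rw [show pvScanStep (res, some c, r) c = (res, some c, r + 1) by simp [pvScanStep]]
      rw [ih hcs c (r + 1) res hc (by omega)]
      rw [List.count_cons_self, List.filter_cons_of_neg (by simp)]
      generalize pvDupCount _ = d
      generalize cs.count c = m
      split_ifs <;> push_cast at * <;> omega
    · have hpc : pvKey3 p ≤ pvKey3 c := hle c (by simp)
      have hpnotin : ∀ x ∈ cs, x ≠ p := by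
        intro x hx he
        apply hcp
        have h1 : pvKey3 c ≤ pvKey3 p := he ▸ hc x hx
        exact pvKey3_inj (le_antisymm h1 hpc)
      rw [show pvScanStep (res, some p, r) c
          = ((if 2 ≤ r then res + 1 else res), some c, 1) by
        simp [pvScanStep, fun h : c = p => hcp h]]
      rw [ih hcs c 1 _ hc (by omega)]
      have hcount : (c :: cs).count p = 0 := by
        rw [List.count_eq_zero]
        intro hmem
        rcases List.mem_cons.mp hmem with h | h
        · exact hcp h.symm
        · exact hpnotin p h rfl
      have hfilter : (c :: cs).filter (fun x => decide (x ≠ p)) = c :: cs := by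
        rw [List.filter_cons_of_pos (by simpa using hcp)]
        rw [List.filter_eq_self.mpr (fun a ha => by simpa using hpnotin a ha)]
      rw [hcount, hfilter, pvDupCount_cons]
      generalize pvDupCount _ = d
      generalize cs.count c = m
      split_ifs <;> push_cast at * <;> omega

-- B's whole scan over a sorted list counts the distinct cells occurring at least twice
theorem pvScan_top (s : List (Int × Int × Int))
    (hs : s.Pairwise (fun a b => pvKey3 a ≤ pvKey3 b)) :
    pvFinish (s.foldl pvScanStep (0, none, 0)) = pvDupCount s := by
  cases s with
  | nil => simp [pvFinish, pvDupCount, PySem.Set.ofList]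
  | cons c cs =>
    rw [List.pairwise_cons] at hs
    obtain ⟨hc, hcs⟩ := hs
    rw [List.foldl_cons]
    rw [show pvScanStep (0, none, 0) c = (0, some c, 1) by simp [pvScanStep]]
    rw [pvScan_go cs hcs c 1 0 hc (by omega), pvDupCount_cons]
    generalize pvDupCount _ = d
    generalize cs.count c = m
    split_ifs <;> push_cast at * <;> omega

-- ===== VERDICT =====
theorem solution_spec : Claim_equal_solution := by
  intro points routes _ hpre
  unfold Spec_solution solution solution_alt
  dsimp only
  rw [PySem.List.foldl_append_eq_flatMap, List.nil_append]
  rw [PySem.List.foldl_congr_mem _ (pvRouteStep points)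
      (fun cells route => cells ++ pvBfs points route) _
      (fun cells route hroute => pvRouteB_eq points route
        (by have := (hpre route hroute).1; intro hnil; subst hnil; simp at this) cells)]
  rw [PySem.List.foldl_append_eq_flatMap, List.nil_append]
  set l := routes.flatMap (pvBfs points) with hl
  -- A's Counter-values loop is the distinct-cells-with-count-≥-2 count
  rw [show (PySem.Dict.counter l).values = (PySem.Dict.counter l).items.map Prod.snd from rfl]
  rw [PySem.Dict.items_counter, List.map_map]
  rw [PySem.List.foldl_ite_add_one (fun i => (2 : Int) ≤ i)]
  rw [List.countP_map]
  -- B's sorted scan is the same count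
  rw [pvSort_eq]
  rw [pvScan_top _ (PySem.List.sorted_pairwise l pvKey3)]
  rw [pvDupCount_perm (PySem.List.sorted_perm l pvKey3 false)]
  unfold pvDupCount
  rw [zero_add, Nat.cast_inj]
  apply List.countP_congr
  intro k _
  exact Iff.rfl
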